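-- pv_equiv track=rewrite | github.com/QingTian1927/SearTxT-and-Texter | coreutils.py | column_sort_lsdir
-- ===== SOURCE A (Python) =====
-- SEPARATOR = '<@v@>'
--
-- def column_sort_lsdir(lsdir_contents, columns_num):
--     """
--     An extracted snippet of list_directory() for sorting lsdir contents.
--
--     Keyword arguments:
--     * lsdir_contents (str)  --  the contents of the working directory
--     * columns_num (int)     --  the number of display columns
--
--     Return values:
--     (all tuple)
--     * multiple_rows   --  the sorted but unprocessed list of lsdir contents
--     * columns_widths  --  the maximum widths of different display columns
--
--     Visualization:
--     * multiple_rows = (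
--     |   '<@v@>.hidden_file<@v@>.hidden_too<@v@>.hidden_xxx',
--     |   '<@v@>big_file<@v@>file1<@v@>file2',
--     |   '<@v@>file3<@v@>long_file<@v@>secret_file'
--     | )
--     * columns_widths = (12, 11, 11)
--     """
--     columns_widths = [0] * columns_num
--     column_index = 0
--     single_row = ''
--     multiple_rows = []
--
--     for ls_index, ls_entry in enumerate(lsdir_contents):
--         if len(ls_entry) > columns_widths[column_index]:
--             columns_widths[column_index] = len(ls_entry)
--         single_row = SEPARATOR.join((single_row, f"{ls_entry}"))
--         column_index += 1
--
--         if column_index == columns_num or ls_index == len(lsdir_contents) - 1: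
--             multiple_rows.append(single_row)
--             column_index = 0
--             single_row = ''
--
--     return tuple(multiple_rows), tuple(columns_widths)
-- ===== SOURCE B (Python) =====
-- SEPARATOR = '<@v@>'
--
-- def column_sort_lsdir(lsdir_contents, columns_num):
--     rows = []
--     columns_widths = [0] * columns_num
--     start = 0
--     while start < len(lsdir_contents):
--         chunk = lsdir_contents[start:start + columns_num]
--         rows.append(SEPARATOR.join([''] + list(chunk)))
--         for pos, entry in enumerate(chunk):
--             columns_widths[pos] = max(columns_widths[pos], len(entry))
--         start += columns_num
--     return tuple(rows), tuple(columns_widths)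
-- ===== Notes on version B (the rewrite author's own statement) =====
-- stated objective: faster
-- what changed: Replaces A's single-pass state machine (running column_index, single_row grown by repeated SEPARATOR.join, flush conditions) by slicing the listing into chunks of columns_num: each chunk is joined into its row in one join call and folded positionally into the column widths.
import Mathlib
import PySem

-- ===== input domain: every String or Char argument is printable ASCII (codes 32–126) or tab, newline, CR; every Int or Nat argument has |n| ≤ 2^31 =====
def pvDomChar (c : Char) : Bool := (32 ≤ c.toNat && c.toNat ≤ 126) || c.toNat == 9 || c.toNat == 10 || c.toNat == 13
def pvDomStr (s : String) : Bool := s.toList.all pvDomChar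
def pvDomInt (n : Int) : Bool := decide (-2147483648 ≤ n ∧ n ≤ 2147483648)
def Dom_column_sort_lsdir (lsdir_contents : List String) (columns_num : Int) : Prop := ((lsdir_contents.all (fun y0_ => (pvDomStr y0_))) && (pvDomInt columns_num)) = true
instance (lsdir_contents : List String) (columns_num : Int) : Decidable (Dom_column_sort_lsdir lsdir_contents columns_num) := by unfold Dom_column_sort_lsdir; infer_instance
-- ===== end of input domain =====

-- B arranges the entries chunk by chunk (slice a row out, join it, fold the widths per position)
-- instead of A's running column_index state machine, which regrows single_row by repeated joins;
-- objective: faster (one join per row instead of quadratic re-copying), measured.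

-- ===== PORT A =====
def pvSep : String := "<@v@>"

-- A's for-loop over enumerate(lsdir_contents), state = (columns_widths, column_index, single_row, multiple_rows).
-- columns_widths[column_index] read/write is ported with pyGetD/pySetD (total forms): under Pre_ the
-- index is always in range; the out-of-range inputs (IndexError) are exactly the ones Pre_ excludes.
def pvLoopA (k n : Int) : List (Int × String) → List Int → Int → String → List String → List String × List Int
  | [], cw, _ci, _sr, mr => (mr, cw)
  | (i, e) :: rest, cw, ci, sr, mr =>
    let le := PySem.Str.len e
    let cw' := if le > PySem.List.pyGetD cw ci 0 then PySem.List.pySetD cw ci le else cw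
    -- SEPARATOR.join((single_row, f"{ls_entry}")); the f-string of a str is the str itself
    let sr' := PySem.Str.join pvSep [sr, e]
    let ci' := ci + 1
    if ci' = k ∨ i = n - 1 then pvLoopA k n rest cw' 0 "" (mr ++ [sr'])
    else pvLoopA k n rest cw' ci' sr' mr

def column_sort_lsdir (lsdir_contents : List String) (columns_num : Int) : List String × List Int :=
  -- [0] * columns_num: empty for a non-positive count, hence toNat as the replication count
  pvLoopA columns_num (PySem.List.len lsdir_contents) (PySem.List.enumerate lsdir_contents 0)
    (List.replicate columns_num.toNat 0) 0 "" []

-- ===== PORT B =====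
-- 'for pos, entry in enumerate(chunk): columns_widths[pos] = max(columns_widths[pos], len(entry))'
def pvChunkWidths (cw : List Int) (chunk : List String) : List Int :=
  (PySem.List.enumerate chunk 0).foldl
    (fun w pe => PySem.List.pySetD w pe.1 (max (PySem.List.pyGetD w pe.1 0) (PySem.Str.len pe.2))) cw

-- B's while-loop over the start index; fuel = len(lsdir_contents) bounds the iteration count
-- (the loop runs at most ceil(len/columns_num) ≤ len times when columns_num ≥ 1, and 0 times when the list is empty)
def pvLoopB (l : List String) (k : Int) : Nat → Int → List String → List Int → List String × List Int
  | 0, _start, rows, cw => (rows, cw)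
  | fuel+1, start, rows, cw =>
    if start < PySem.List.len l then
      let chunk := PySem.List.slice l (some start) (some (start + k))
      pvLoopB l k fuel (start + k) (rows ++ [PySem.Str.join pvSep ("" :: chunk)]) (pvChunkWidths cw chunk)
    else (rows, cw)

def column_sort_lsdir_alt (lsdir_contents : List String) (columns_num : Int) : List String × List Int :=
  pvLoopB lsdir_contents columns_num lsdir_contents.length 0 []
    (List.replicate columns_num.toNat 0)

-- ===== PRECONDITION & SPEC =====
-- Pre_ excludes exactly the inputs on which A raises IndexError: a non-empty listing with
-- columns_num ≤ 0 (columns_widths is then empty and columns_widths[0] fails on the first entry).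
def Pre_column_sort_lsdir (lsdir_contents : List String) (columns_num : Int) : Prop :=
  lsdir_contents = [] ∨ 1 ≤ columns_num
instance (lsdir_contents : List String) (columns_num : Int) : Decidable (Pre_column_sort_lsdir lsdir_contents columns_num) := by unfold Pre_column_sort_lsdir; infer_instance

def pvWitness_column_sort_lsdir : List String × Int := (["ab", "c", "d"], 2)

def Spec_column_sort_lsdir (lsdir_contents : List String) (columns_num : Int) (out : List String × List Int) : Prop := out = column_sort_lsdir_alt lsdir_contents columns_num
instance (lsdir_contents : List String) (columns_num : Int) (out : List String × List Int) : Decidable (Spec_column_sort_lsdir lsdir_contents columns_num out) := by unfold Spec_column_sort_lsdir; infer_instance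

-- ===== CLAIM (what is proved, stated in full; the proofs are below) =====
def Claim_equal_column_sort_lsdir : Prop := ∀ (lsdir_contents : List String) (columns_num : Int), Dom_column_sort_lsdir lsdir_contents columns_num → Pre_column_sort_lsdir lsdir_contents columns_num → Spec_column_sort_lsdir lsdir_contents columns_num (column_sort_lsdir lsdir_contents columns_num)

-- ===== LEMMAS AND PROOFS =====

-- proof-only helpers: A's width update written in B's max form, the per-chunk width fold, the row accumulator
def pvUpdW (cw : List Int) (i : Int) (e : String) : List Int :=
  PySem.List.pySetD cw i (max (PySem.List.pyGetD cw i 0) (PySem.Str.len e))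

def pvWSpec : List Int → Int → List String → List Int
  | cw, _, [] => cw
  | cw, i, e :: c => pvWSpec (pvUpdW cw i e) (i + 1) c

def pvRowAcc : String → List String → String
  | sr, [] => sr
  | sr, e :: c => pvRowAcc (PySem.Str.join pvSep [sr, e]) c

-- writing back the value just read is a no-op
lemma pvSetD_getD (xs : List Int) (p : Nat) (d : Int) :
    PySem.List.pySetD xs (p : Int) (PySem.List.pyGetD xs (p : Int) d) = xs := by
  rw [PySem.List.pyGetD_natCast, PySem.List.pySetD_natCast]
  rcases Nat.lt_or_ge p xs.length with h | h
  · rw [List.getD_eq_getElem _ _ h]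
    exact List.set_getElem_self h
  · exact List.set_eq_of_length_le h

-- A's conditional width bump is B's max-update
lemma pvUpd_eq (cw : List Int) (p : Nat) (e : String) :
    (if PySem.Str.len e > PySem.List.pyGetD cw (p : Int) 0
      then PySem.List.pySetD cw (p : Int) (PySem.Str.len e) else cw) = pvUpdW cw (p : Int) e := by
  unfold pvUpdW
  split_ifs with h
  · rw [max_eq_right (le_of_lt h)]
  · rw [max_eq_left (not_lt.mp h)]
    exact (pvSetD_getD cw p 0).symm

lemma pvWSpec_append (a b : List String) : ∀ (cw : List Int) (i : Int),
    pvWSpec cw i (a ++ b) = pvWSpec (pvWSpec cw i a) (i + a.length) b := by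
  induction a with
  | nil => intro cw i; simp [pvWSpec]
  | cons e a ih =>
    intro cw i
    rw [List.cons_append]
    show pvWSpec (pvUpdW cw i e) (i + 1) (a ++ b) = _
    rw [ih]
    show _ = pvWSpec (pvWSpec (pvUpdW cw i e) (i + 1) a) (i + ((e :: a).length : Int)) b
    congr 1
    simp only [List.length_cons]
    push_cast
    omega

lemma pvRowAcc_append (a b : List String) : ∀ sr, pvRowAcc sr (a ++ b) = pvRowAcc (pvRowAcc sr a) b := by
  induction a with
  | nil => intro sr; rfl
  | cons e a ih => intro sr; exact ih _

lemma pvRowAcc_join (c : List String) : ∀ sr, pvRowAcc sr c = PySem.Str.join pvSep (sr :: c) := by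
  induction c with
  | nil =>
    intro sr
    apply String.toList_inj.mp
    simp [pvRowAcc, PySem.Str.toList_join, PySem.Chars.join_singleton]
  | cons e c ih =>
    intro sr
    show pvRowAcc (PySem.Str.join pvSep [sr, e]) c = _
    rw [ih]
    apply String.toList_inj.mp
    cases c <;>
      simp [PySem.Str.toList_join, PySem.Chars.join_cons_cons, PySem.Chars.join_singleton,
        List.append_assoc]

lemma pvChunkWidths_eq (chunk : List String) : ∀ cw, pvChunkWidths cw chunk = pvWSpec cw 0 chunk := by
  suffices h : ∀ (j : Int) (cw : List Int),
      (PySem.List.enumerate chunk j).foldl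
        (fun w pe => PySem.List.pySetD w pe.1 (max (PySem.List.pyGetD w pe.1 0) (PySem.Str.len pe.2))) cw
        = pvWSpec cw j chunk by
    intro cw; exact h 0 cw
  induction chunk with
  | nil => intro j cw; simp [PySem.List.enumerate_nil, pvWSpec]
  | cons e c ih =>
    intro j cw
    rw [PySem.List.enumerate_cons, List.foldl_cons, ih]
    rfl

lemma pvEnumAppend (a b : List (String)) : ∀ j : Int,
    PySem.List.enumerate (a ++ b) j = PySem.List.enumerate a j ++ PySem.List.enumerate b (j + a.length) := by
  induction a with
  | nil => intro j; simp [PySem.List.enumerate_nil]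
  | cons e a ih =>
    intro j
    have harith : j + (((e :: a).length : Nat) : Int) = (j + 1) + (a.length : Int) := by
      simp only [List.length_cons]
      push_cast
      ring
    rw [List.cons_append, PySem.List.enumerate_cons, PySem.List.enumerate_cons, ih,
      List.cons_append, harith]

-- A's loop across one chunk, before the flush: widths fold forward, the row accumulates, nothing is emitted
lemma pvLoopA_inner (k n : Int) (c : List String) : ∀ (es : List (Int × String)) (j : Int) (p : Nat)
    (cw : List Int) (sr : String) (mr : List String),
    (∀ m : Nat, m < c.length → (p : Int) + m + 1 ≠ k) →
    (∀ m : Nat, m < c.length → j + m ≠ n - 1) →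
    pvLoopA k n (PySem.List.enumerate c j ++ es) cw p sr mr =
      pvLoopA k n es (pvWSpec cw p c) ((p : Int) + c.length) (pvRowAcc sr c) mr := by
  induction c with
  | nil =>
    intro es j p cw sr mr _ _
    simp [PySem.List.enumerate_nil, pvWSpec, pvRowAcc]
  | cons e c ih =>
    intro es j p cw sr mr hci hj
    rw [PySem.List.enumerate_cons, List.cons_append]
    have h1 : ((p : Int)) + 1 ≠ k := by
      have := hci 0 (by simp)
      simpa using this
    have h2 : j ≠ n - 1 := by
      have := hj 0 (by simp)
      simpa using this
    show (if (p : Int) + 1 = k ∨ j = n - 1 then _ else _) = _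
    rw [if_neg (by rintro (h | h); exact h1 h; exact h2 h)]
    rw [pvUpd_eq cw p e]
    have hc1 : ∀ m : Nat, m < c.length → ((p + 1 : Nat) : Int) + m + 1 ≠ k := by
      intro m hm
      have := hci (m + 1) (by simp; omega)
      push_cast at this ⊢
      omega
    have hc2 : ∀ m : Nat, m < c.length → (j + 1) + m ≠ n - 1 := by
      intro m hm
      have := hj (m + 1) (by simp; omega)
      push_cast at this ⊢
      omega
    have := ih es (j + 1) (p + 1) (pvUpdW cw (p : Int) e) (PySem.Str.join pvSep [sr, e]) mr hc1 hc2
    push_cast at this ⊢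
    rw [this]
    show pvLoopA k n es (pvWSpec (pvUpdW cw (p : Int) e) ((p : Int) + 1) c) _ _ mr = _
    congr 1
    simp only [List.length_cons]
    push_cast
    omega

-- one full iteration of A's implicit chunking: consume take k.toNat t, flush one row
lemma pvChunkStep (k n : Int) (hk : 1 ≤ k) (t : List String) (ht : t ≠ []) :
    ∀ (j : Int) (cw : List Int) (mr : List String), j + t.length = n →
    pvLoopA k n (PySem.List.enumerate t j) cw 0 "" mr =
      pvLoopA k n (PySem.List.enumerate (t.drop k.toNat) (j + (min k.toNat t.length : Nat)))
        (pvWSpec cw 0 (t.take k.toNat)) 0 "" (mr ++ [pvRowAcc "" (t.take k.toNat)]) := by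
  intro j cw mr hn
  have hKk : ((k.toNat : Int)) = k := Int.toNat_of_nonneg (by omega)
  have htl : 0 < t.length := List.length_pos_of_ne_nil ht
  have hclen : (t.take k.toNat).length = min k.toNat t.length := List.length_take
  have hcne : t.take k.toNat ≠ [] := by
    intro h; rw [h] at hclen; simp at hclen; omega
  have hce : (t.take k.toNat).dropLast ++ [(t.take k.toNat).getLast hcne] = t.take k.toNat :=
    List.dropLast_concat_getLast hcne
  have hc'len : (t.take k.toNat).dropLast.length = min k.toNat t.length - 1 := by
    rw [List.length_dropLast, hclen]
  have e1 : PySem.List.enumerate t j =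
      PySem.List.enumerate (t.take k.toNat) j ++
        PySem.List.enumerate (t.drop k.toNat) (j + ((t.take k.toNat).length : Int)) := by
    conv_lhs => rw [← List.take_append_drop k.toNat t]
    exact pvEnumAppend _ _ j
  have e2 : PySem.List.enumerate (t.take k.toNat) j =
      PySem.List.enumerate (t.take k.toNat).dropLast j ++
        [(j + ((t.take k.toNat).dropLast.length : Int), (t.take k.toNat).getLast hcne)] := by
    conv_lhs => rw [← hce]
    rw [pvEnumAppend]
    rw [PySem.List.enumerate_cons, PySem.List.enumerate_nil]
  rw [e1, e2, List.append_assoc]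
  have hinner := pvLoopA_inner k n (t.take k.toNat).dropLast
    ([(j + ((t.take k.toNat).dropLast.length : Int), (t.take k.toNat).getLast hcne)] ++
      PySem.List.enumerate (t.drop k.toNat) (j + ((t.take k.toNat).length : Int)))
    j 0 cw "" mr
    (by intro m hm; rw [hc'len] at hm; push_cast; omega)
    (by intro m hm; rw [hc'len] at hm; omega)
  push_cast at hinner
  rw [hinner, List.singleton_append]
  have hcond : (0 : Int) + ((t.take k.toNat).dropLast.length : Int) + 1 = k ∨
      j + ((t.take k.toNat).dropLast.length : Int) = n - 1 := by
    rcases Nat.lt_or_ge t.length k.toNat with hlt | hge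
    · right; rw [hc'len]; omega
    · left; rw [hc'len]; omega
  show (if _ ∨ _ then _ else _) = _
  rw [if_pos hcond]
  have hupd := pvUpd_eq (pvWSpec cw 0 (t.take k.toNat).dropLast) (t.take k.toNat).dropLast.length
    ((t.take k.toNat).getLast hcne)
  rw [zero_add, hupd]
  congr 1
  · congr 1
    rw [hclen]
  · conv_rhs => rw [← hce]
    rw [pvWSpec_append]
    simp [pvWSpec]
  · conv_rhs => rw [← hce]
    rw [pvRowAcc_append]
    simp [pvRowAcc]

-- the main simulation: A's state machine from a fresh row equals B's chunk loop from the matching start index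
lemma pvMain (l : List String) (k : Int) (hk : 1 ≤ k) : ∀ (fuel : Nat) (t : List String)
    (j start : Int) (cw : List Int) (mr : List String),
    t.length ≤ fuel → 0 ≤ start → List.drop start.toNat l = t → j + t.length = PySem.List.len l →
    pvLoopA k (PySem.List.len l) (PySem.List.enumerate t j) cw 0 "" mr = pvLoopB l k fuel start mr cw := by
  intro fuel
  induction fuel with
  | zero =>
    intro t j start cw mr hf _ _ _
    have ht : t = [] := List.eq_nil_of_length_eq_zero (Nat.le_zero.mp hf)
    subst ht
    rw [PySem.List.enumerate_nil]
    rfl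
  | succ f ih =>
    intro t j start cw mr hf hs hdrop hn
    by_cases ht : t = []
    · subst ht
      rw [PySem.List.enumerate_nil]
      have hle : l.length ≤ start.toNat := by
        by_contra h
        push_neg at h
        have := List.drop_eq_nil_iff.mp hdrop
        omega
      show (mr, cw) = _
      simp only [pvLoopB, PySem.List.len_eq]
      rw [if_neg (by omega)]
    · have hlen0 : 0 < t.length := List.length_pos_of_ne_nil ht
      have hstart_lt : start.toNat < l.length := by
        by_contra h
        push_neg at h
        rw [List.drop_eq_nil_of_le h] at hdrop
        exact ht hdrop.symm
      have hnl : j + (t.length : Int) = (l.length : Int) := by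
        rw [PySem.List.len_eq] at hn; exact hn
      rw [pvChunkStep k (PySem.List.len l) hk t ht j cw mr hn]
      have hchunk : PySem.List.slice l (some start) (some (start + k)) = t.take k.toNat := by
        rw [PySem.List.slice_toNat l hs (by omega), hdrop,
          show (start + k).toNat - start.toNat = k.toNat by omega]
      show _ = pvLoopB l k (f + 1) start mr cw
      simp only [pvLoopB, PySem.List.len_eq]
      rw [if_pos (by omega : start < (l.length : Int))]
      rw [hchunk, pvChunkWidths_eq, ← pvRowAcc_join]
      apply ih
      · rw [List.length_drop]; omega
      · omega
      · rw [← hdrop, show (start + k).toNat = start.toNat + k.toNat by omega, ← List.drop_drop]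
      · rw [PySem.List.len_eq, List.length_drop]
        push_cast
        omega

-- ===== VERDICT (by name: the statement is the Claim_ definition above) =====
theorem column_sort_lsdir_spec : Claim_equal_column_sort_lsdir := by
  intro l k _hdom hpre
  unfold Spec_column_sort_lsdir
  rcases hpre with hl | hk
  · subst hl; rfl
  · unfold column_sort_lsdir column_sort_lsdir_alt
    exact pvMain l k hk l.length l 0 0 _ [] le_rfl le_rfl (by simp) (by simp)
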